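-- pv_equiv track=rewrite | github.com/ccam80/zotero-chunk-mcp | src/zotero_chunk_rag/section_detector.py | _find_line_index
-- ===== SOURCE A (Python) =====
-- def _find_line_index(char_offset: int, line_starts: list[int]) -> int | None:
--     """Find which line index contains the given character offset."""
--     for i, start in enumerate(line_starts):
--         if i + 1 < len(line_starts):
--             if start <= char_offset < line_starts[i + 1]:
--                 return i
--         else:
--             if start <= char_offset:
--                 return i
--     return None
-- ===== SOURCE B (Python) =====
-- def _find_line_index(char_offset: int, line_starts: list[int]) -> int | None:
--     """Find which line index contains the given character offset.
--
--     Binary search over the (sorted) line_starts: locate the insertion point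
--     of char_offset to the right of equal elements; the line containing the
--     offset is the one just before that point, or None if the offset lies
--     before the first line start.
--     """
--     lo, hi = 0, len(line_starts)
--     while lo < hi:
--         mid = (lo + hi) // 2
--         if line_starts[mid] <= char_offset:
--             lo = mid + 1
--         else:
--             hi = mid
--     return lo - 1 if lo > 0 else None
-- ===== Notes on version B (the rewrite author's own statement) =====
-- stated objective: alternative
-- what changed: Replaced A's linear scan over line windows by a hand-written bisect_right binary search over line_starts, returning the index before the insertion point (None if the offset is below the first start); asymptotically O(log n) but unverified in a timing run, so no speed is claimed.
-- outside the precondition, e.g. on _find_line_index(5, [0, 10, 0, 10]): A returns 0, B returns 2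
import Mathlib
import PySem

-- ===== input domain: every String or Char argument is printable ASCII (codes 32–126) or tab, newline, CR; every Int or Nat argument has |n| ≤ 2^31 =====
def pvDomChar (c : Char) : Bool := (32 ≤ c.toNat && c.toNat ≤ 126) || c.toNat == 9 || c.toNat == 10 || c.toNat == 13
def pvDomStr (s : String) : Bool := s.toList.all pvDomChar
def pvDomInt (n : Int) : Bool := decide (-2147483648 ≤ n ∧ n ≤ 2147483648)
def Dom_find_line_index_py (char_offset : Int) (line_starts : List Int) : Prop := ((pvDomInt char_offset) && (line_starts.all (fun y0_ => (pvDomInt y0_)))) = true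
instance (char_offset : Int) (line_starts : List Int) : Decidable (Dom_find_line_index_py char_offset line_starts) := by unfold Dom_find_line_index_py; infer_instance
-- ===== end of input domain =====

-- B replaces A's linear scan over line windows by a binary search (bisect_right - 1) over
-- line_starts; equivalence is claimed where the elements ≤ char_offset form a prefix of the
-- list (in particular on all sorted line_starts).


-- ===== PORT A =====
-- `for i, start in enumerate(line_starts): …` with early return, as structural
-- recursion over the remaining list together with the running index i.
def findA_go (char_offset : Int) (line_starts : List Int) (i : Nat) (rest : List Int) : Option Int :=
  match rest with
  | [] => none
  | start :: tl =>
    if i + 1 < line_starts.length then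
      match PySem.List.pyGet? line_starts ((i : Int) + 1) with
      | some nxt =>
        if start ≤ char_offset ∧ char_offset < nxt then some (i : Int)
        else findA_go char_offset line_starts (i + 1) tl
      | none => none  -- unreachable: i + 1 < length
    else
      if start ≤ char_offset then some (i : Int)
      else findA_go char_offset line_starts (i + 1) tl

def find_line_index_py (char_offset : Int) (line_starts : List Int) : Option Int :=
  findA_go char_offset line_starts 0 line_starts

-- ===== PORT B =====
-- the `while lo < hi` binary-search loop of Source B
def findB_go (char_offset : Int) (line_starts : List Int) (lo hi : Nat) : Nat :=
  if _h : lo < hi then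
    let mid := (lo + hi) / 2
    if line_starts.getD mid 0 ≤ char_offset then  -- mid < line_starts.length always
      findB_go char_offset line_starts (mid + 1) hi
    else
      findB_go char_offset line_starts lo mid
  else lo
termination_by hi - lo
decreasing_by all_goals omega

def find_line_index_py_alt (char_offset : Int) (line_starts : List Int) : Option Int :=
  let lo := findB_go char_offset line_starts 0 line_starts.length
  if lo > 0 then some ((lo : Int) - 1) else none

-- ===== PRECONDITION & SPEC =====
-- Pre_ excludes line_starts on which the elements ≤ char_offset do not form a prefix of the
-- list (possible only for unsorted line_starts, outside the function's natural domain of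
-- sorted line start offsets); there A's first-matching-window value is accidental.
def Pre_find_line_index_py (char_offset : Int) (line_starts : List Int) : Prop :=
  List.Pairwise (fun x y => y ≤ char_offset → x ≤ char_offset) line_starts
instance (char_offset : Int) (line_starts : List Int) : Decidable (Pre_find_line_index_py char_offset line_starts) := by unfold Pre_find_line_index_py; infer_instance

def pvWitness_find_line_index_py : Int × List Int := (7, [0, 3, 9, 9, 20])

def Spec_find_line_index_py (char_offset : Int) (line_starts : List Int) (out : Option Int) : Prop := out = find_line_index_py_alt char_offset line_starts
instance (char_offset : Int) (line_starts : List Int) (out : Option Int) : Decidable (Spec_find_line_index_py char_offset line_starts out) := by unfold Spec_find_line_index_py; infer_instance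

-- ===== CLAIM (what is proved, stated in full; the proofs are below) =====
def Claim_equal_find_line_index_py : Prop := ∀ (char_offset : Int) (line_starts : List Int), Dom_find_line_index_py char_offset line_starts → Pre_find_line_index_py char_offset line_starts → Spec_find_line_index_py char_offset line_starts (find_line_index_py char_offset line_starts)

-- ===== LEMMAS AND PROOFS =====

-- k = number of elements ≤ c; in a sorted list these form a prefix of length k.
def pvK (c : Int) (ls : List Int) : Nat := ls.countP (fun x => decide (x ≤ c))

theorem pvK_le_length (c : Int) (ls : List Int) : pvK c ls ≤ ls.length :=
  List.countP_le_length

theorem pvK_key (c : Int) (ls : List Int)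
    (hs : List.Pairwise (fun x y => y ≤ c → x ≤ c) ls)
    (i : Nat) (hi : i < ls.length) : ls[i] ≤ c ↔ i < pvK c ls := by
  induction ls generalizing i with
  | nil => simp at hi
  | cons a tl ih =>
    rcases List.pairwise_cons.mp hs with ⟨ha, htl⟩
    by_cases hac : a ≤ c
    · have hk : pvK c (a :: tl) = pvK c tl + 1 := by
        simp [pvK, hac]
      cases i with
      | zero => simpa [hk] using hac
      | succ j =>
        have hj : j < tl.length := by simpa using hi
        have := ih htl j hj
        simpa [hk, Nat.succ_lt_succ_iff] using this
    · have hall : ∀ x ∈ tl, ¬ x ≤ c := fun x hx hxc => hac (ha x hx hxc)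
      have hk : pvK c (a :: tl) = 0 := by
        have h0 : List.countP (fun x => decide (x ≤ c)) tl = 0 :=
          List.countP_eq_zero.mpr (fun x hx h => hall x hx (of_decide_eq_true h))
        simp [pvK, hac, h0]
      cases i with
      | zero => simp [hk, hac]
      | succ j =>
        have hj : j < tl.length := by simpa using hi
        simp [hk, hall tl[j] (List.getElem_mem hj)]

theorem findB_go_eq (c : Int) (ls : List Int) (hs : List.Pairwise (fun x y => y ≤ c → x ≤ c) ls) :
    ∀ lo hi : Nat, lo ≤ pvK c ls → pvK c ls ≤ hi → hi ≤ ls.length →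
      findB_go c ls lo hi = pvK c ls := by
  intro lo hi
  induction hlh : hi - lo using Nat.strong_induction_on generalizing lo hi with
  | _ n ih =>
    intro h1 h2 h3
    by_cases h : lo < hi
    · have hmid : (lo + hi) / 2 < ls.length := by omega
      rw [findB_go]
      simp only [h, dite_true]
      have hget : ls.getD ((lo + hi) / 2) 0 = ls[(lo + hi) / 2] := by
        simp [List.getD_eq_getElem?_getD, List.getElem?_eq_getElem hmid]
      by_cases hle : ls[(lo + hi) / 2] ≤ c
      · have hlt : (lo + hi) / 2 < pvK c ls := (pvK_key c ls hs _ hmid).mp hle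
        rw [hget, if_pos hle]
        exact ih (hi - ((lo + hi) / 2 + 1)) (by omega) _ _ rfl (by omega) h2 h3
      · have hge : pvK c ls ≤ (lo + hi) / 2 := by
          by_contra hcon
          exact hle ((pvK_key c ls hs _ hmid).mpr (by omega))
        rw [hget, if_neg hle]
        exact ih ((lo + hi) / 2 - lo) (by omega) _ _ rfl h1 hge (by omega)
    · rw [findB_go]
      simp only [h, dite_false]
      omega

theorem findA_go_eq (c : Int) (ls : List Int) (hs : List.Pairwise (fun x y => y ≤ c → x ≤ c) ls) :
    ∀ i : Nat, i ≤ ls.length →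
      findA_go c ls i (ls.drop i) =
        if i < pvK c ls then some ((pvK c ls : Int) - 1) else none := by
  intro i
  induction hd : ls.length - i using Nat.strong_induction_on generalizing i with
  | _ n ih =>
    intro hle
    by_cases hi : i < ls.length
    · have hdrop : ls.drop i = ls[i] :: ls.drop (i + 1) :=
        List.drop_eq_getElem_cons hi
      rw [hdrop, findA_go]
      by_cases hnext : i + 1 < ls.length
      · have hget : PySem.List.pyGet? ls ((i : Int) + 1) = some ls[i + 1] := by
          have : ((i : Int) + 1) = ((i + 1 : Nat) : Int) := by push_cast; ring
          rw [this, PySem.List.pyGet?_natCast]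
          simp [hnext]
        simp only [hnext, if_true, hget]
        by_cases hcond : ls[i] ≤ c ∧ c < ls[i + 1]
        · have h1 : i < pvK c ls := (pvK_key c ls hs i hi).mp hcond.1
          have h2 : ¬ (i + 1 < pvK c ls) := fun hcon =>
            absurd ((pvK_key c ls hs (i + 1) hnext).mpr hcon) (not_le.mpr hcond.2)
          have hk : pvK c ls = i + 1 := by omega
          simp [hcond, hk]
        · rw [if_neg hcond]
          have hrec := ih (ls.length - (i + 1)) (by omega) (i + 1) rfl (by omega)
          rw [hrec]
          have hiff : i < pvK c ls ↔ i + 1 < pvK c ls := by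
            constructor
            · intro h1
              rcases Nat.lt_or_ge (i + 1) (pvK c ls) with h | h
              · exact h
              · have hk : pvK c ls = i + 1 := by omega
                exact absurd ⟨(pvK_key c ls hs i hi).mpr h1,
                  not_le.mp (fun hle2 => by
                    have := (pvK_key c ls hs (i + 1) hnext).mp hle2
                    omega)⟩ hcond
            · intro h1; omega
          by_cases h2 : i + 1 < pvK c ls
          · rw [if_pos h2, if_pos (hiff.mpr h2)]
          · rw [if_neg h2, if_neg (fun h => h2 (hiff.mp h))]
      · have hlen : i + 1 = ls.length := by omega
        simp only [hnext, if_false]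
        by_cases hcond : ls[i] ≤ c
        · have h1 : i < pvK c ls := (pvK_key c ls hs i hi).mp hcond
          have hk : pvK c ls = i + 1 := by
            have := pvK_le_length c ls; omega
          simp [hcond, hk]
        · have h1 : ¬ i < pvK c ls := fun hcon =>
            hcond ((pvK_key c ls hs i hi).mpr hcon)
          have hrest : ls.drop (i + 1) = [] := by
            rw [List.drop_eq_nil_iff]; omega
          rw [if_neg hcond, hrest, findA_go]
          simp [h1]
    · have hieq : i = ls.length := by omega
      have : ls.drop i = [] := by rw [List.drop_eq_nil_iff]; omega
      rw [this, findA_go]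
      have := pvK_le_length c ls
      have : ¬ i < pvK c ls := by omega
      simp [this]

-- ===== VERDICT (by name: the statement is the Claim_ definition above) =====
theorem find_line_index_py_spec : Claim_equal_find_line_index_py := by
  intro c ls _ hpre
  unfold Spec_find_line_index_py find_line_index_py find_line_index_py_alt
  have hA := findA_go_eq c ls hpre 0 (Nat.zero_le _)
  rw [List.drop_zero] at hA
  rw [hA, findB_go_eq c ls hpre 0 ls.length (Nat.zero_le _) (pvK_le_length c ls) le_rfl]
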